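-- pv_equiv track=rewrite | github.com/ALMOWAFI/hackthon | math_analyzer/azure_ocr.py | _is_potential_math
-- ===== SOURCE A (Python) =====
-- def _is_potential_math(text: str) -> bool:
--     """Check if text could be a mathematical expression."""
--     # Check for numbers
--     if any(c.isdigit() for c in text):
--         # Check for math operators
--         if any(op in text for op in "+-*/=()[]{}"):
--             return True
--
--     # Check for algebra (variables)
--     if any(c.isalpha() for c in text) and any(op in text for op in "=+-*/()"):
--         return True
--
--     # Specific checks for division notation
--     if "/" in text or "\\" in text:
--         return True
--
--     return False
-- ===== SOURCE B (Python) =====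
-- def _is_potential_math(text: str) -> bool:
--     """Check if text could be a mathematical expression (single pass over the characters)."""
--     has_digit = has_alpha = has_math = has_algebra = has_slash = False
--     for c in text:
--         if c.isdigit():
--             has_digit = True
--         if c.isalpha():
--             has_alpha = True
--         if c in "+-*/=()[]{}":
--             has_math = True
--         if c in "=+-*/()":
--             has_algebra = True
--         if c in "/\\":
--             has_slash = True
--     return (has_digit and has_math) or (has_alpha and has_algebra) or has_slash
-- ===== Notes on version B (the rewrite author's own statement) =====
-- stated objective: simpler
-- what changed: A makes up to six separate scans of the text (two any() generator scans plus four substring searches per operator set); B is one pass over the characters accumulating five boolean flags combined at the end.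
import Mathlib
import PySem

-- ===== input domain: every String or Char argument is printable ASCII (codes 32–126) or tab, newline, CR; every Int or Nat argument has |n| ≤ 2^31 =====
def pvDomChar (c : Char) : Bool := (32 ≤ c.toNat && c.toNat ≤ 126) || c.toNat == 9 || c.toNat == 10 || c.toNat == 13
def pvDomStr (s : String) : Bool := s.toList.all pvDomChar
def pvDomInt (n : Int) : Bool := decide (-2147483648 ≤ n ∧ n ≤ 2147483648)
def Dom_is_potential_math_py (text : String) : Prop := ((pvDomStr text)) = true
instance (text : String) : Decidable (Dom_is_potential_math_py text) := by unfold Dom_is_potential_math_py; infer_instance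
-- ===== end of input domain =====

-- B replaces A's several scans (two any() generators plus per-operator substring searches)
-- by one pass over the characters accumulating five boolean flags; same result (objective: simpler).

-- ===== PORT A =====
-- literal port of A: each `any(op in text for op in ops)` scans the operator string and
-- tests single-character substring membership with PySem.Chars.isIn.
def is_potential_math_py (text : String) : Bool :=
  let cs := text.toList
  if cs.any PySem.Chars.isdigit &&
     ("+-*/=()[]{}".toList).any (fun op => PySem.Chars.isIn [op] cs) then
    true
  else if cs.any PySem.Chars.isalpha &&
     ("=+-*/()".toList).any (fun op => PySem.Chars.isIn [op] cs) then
    true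
  else if PySem.Chars.isIn ['/'] cs || PySem.Chars.isIn ['\\'] cs then
    true
  else
    false

-- ===== PORT B =====
-- port of Source B: one fold over the characters maintaining the five flags
-- (has_digit, has_alpha, has_math, has_algebra, has_slash), combined at the end.
def is_potential_math_py_alt (text : String) : Bool :=
  let st := text.toList.foldl
    (fun (st : Bool × Bool × Bool × Bool × Bool) c =>
      (st.1 || PySem.Chars.isdigit c,
       st.2.1 || PySem.Chars.isalpha c,
       st.2.2.1 || ("+-*/=()[]{}".toList).contains c,
       st.2.2.2.1 || ("=+-*/()".toList).contains c,
       st.2.2.2.2 || ("/\\".toList).contains c))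
    (false, false, false, false, false)
  (st.1 && st.2.2.1) || (st.2.1 && st.2.2.2.1) || st.2.2.2.2

-- ===== PRECONDITION & SPEC =====
def Spec_is_potential_math_py (text : String) (out : Bool) : Prop := out = is_potential_math_py_alt text
instance (text : String) (out : Bool) : Decidable (Spec_is_potential_math_py text out) := by unfold Spec_is_potential_math_py; infer_instance

-- ===== CLAIM (what is proved, stated in full; the proofs are below) =====
def Claim_equal_is_potential_math_py : Prop := ∀ (text : String), Dom_is_potential_math_py text → Spec_is_potential_math_py text (is_potential_math_py text)

-- ===== LEMMAS AND PROOFS =====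

-- the fold of B computes, in each component, "initial flag or some character satisfies the test"
theorem foldl_flags (l : List Char) (a b c d e : Bool) :
    l.foldl
      (fun (st : Bool × Bool × Bool × Bool × Bool) c =>
        (st.1 || PySem.Chars.isdigit c,
         st.2.1 || PySem.Chars.isalpha c,
         st.2.2.1 || ("+-*/=()[]{}".toList).contains c,
         st.2.2.2.1 || ("=+-*/()".toList).contains c,
         st.2.2.2.2 || ("/\\".toList).contains c))
      (a, b, c, d, e)
    = (a || l.any PySem.Chars.isdigit,
       b || l.any PySem.Chars.isalpha,
       c || l.any (fun x => ("+-*/=()[]{}".toList).contains x),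
       d || l.any (fun x => ("=+-*/()".toList).contains x),
       e || l.any (fun x => ("/\\".toList).contains x)) := by
  induction l generalizing a b c d e with
  | nil => simp
  | cons x xs ih => rw [List.foldl_cons, ih]; simp [Bool.or_assoc]

-- scanning the operator list for membership in the text equals scanning the text for
-- membership in the operator list
theorem any_contains_comm (l₁ l₂ : List Char) :
    l₁.any (fun x => l₂.contains x) = l₂.any (fun x => l₁.contains x) := by
  rw [Bool.eq_iff_iff]
  simp only [List.any_eq_true, List.contains_iff_mem]
  constructor
  · rintro ⟨x, h1, h2⟩; exact ⟨x, h2, h1⟩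
  · rintro ⟨x, h1, h2⟩; exact ⟨x, h2, h1⟩

-- single-character substring test is character membership
theorem isIn_singleton (op : Char) (l : List Char) :
    PySem.Chars.isIn [op] l = l.contains op := by
  rw [Bool.eq_iff_iff, PySem.Chars.isIn_iff_infix, List.singleton_infix_iff,
    List.contains_iff_mem]

theorem is_potential_math_py_spec : Claim_equal_is_potential_math_py := by
  intro text _
  unfold Spec_is_potential_math_py is_potential_math_py is_potential_math_py_alt
  simp only [foldl_flags, Bool.false_or, isIn_singleton]
  rw [any_contains_comm "+-*/=()[]{}".toList, any_contains_comm "=+-*/()".toList]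
  have hslash : text.toList.any (fun x => ("/\\".toList).contains x)
      = (text.toList.contains '/' || text.toList.contains '\\') := by
    rw [Bool.eq_iff_iff]
    simp only [List.any_eq_true, List.contains_iff_mem, Bool.or_eq_true]
    constructor
    · rintro ⟨x, hx, hm⟩
      simp at hm
      rcases hm with h | h <;> subst h <;> simp [hx]
    · rintro (h | h)
      · exact ⟨'/', h, by decide⟩
      · exact ⟨'\\', h, by decide⟩
  rw [hslash]
  cases text.toList.any PySem.Chars.isdigit <;>
  cases text.toList.any PySem.Chars.isalpha <;>
  cases text.toList.any (fun x => ("+-*/=()[]{}".toList).contains x) <;>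
  cases text.toList.any (fun x => ("=+-*/()".toList).contains x) <;>
  cases text.toList.contains '/' <;>
  cases text.toList.contains '\\' <;> simp
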